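-- pv_equiv track=rewrite | github.com/build3r/HackBU | backend/backend.py | get_nice_message
-- ===== SOURCE A (Python) =====
-- MAX_GIFTS = 3
--
-- not_enough_info_string = "I don't have enough info to suggest anything for {0}. Perhaps you should ask {0} yourself."
--
-- def get_nice_message(gifts_list):
--     if not gifts_list:
--         return not_enough_info_string
--     else:
--         final_message = ''
--         curr_spot = 0
--         for gift in gifts_list[0:MAX_GIFTS]:
--             if gift[0][0] == 'sports team':
--                 if curr_spot == 0:
--                     final_message += '{0} might like an item from the ' + gift[0][1] + '. I found one for ' + gift[1] + ' dollars on ebay.'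
--                 else:
--                     final_message += ' {0} might also like an item from the ' + gift[0][1] + '. I found one for ' + gift[1] + ' dollars on ebay.'
--             elif gift[0][0] == 'book':
--                 if curr_spot == 0:
--                     final_message += '{0} might like the book ' + gift[0][1] + '. I found a copy for ' + gift[1] + ' dollars on ebay.'
--                 else:
--                     final_message += ' {0} might also like the book ' + gift[0][1] + '. I found a copy for ' + gift[1] + ' dollars on ebay.'
--             elif gift[0][0] == 'musician':
--                 if curr_spot == 0:
--                     final_message += '{0} might like something by ' + gift[0][1] + '. I found some merchandise for ' + gift[1] + ' dollars on ebay.'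
--                 else:
--                     final_message += ' {0} might also like something by ' + gift[0][1] + '. I found some merchandise for ' + gift[1] + ' dollars on ebay.'
--             elif gift[0][0] == 'computers':
--                 if curr_spot != 0:
--                     final_message += ' '
--                 final_message += 'It might be time for {0} to get some new tech. I found a ' + gift[0][1] + ' for ' + gift[1] + ' dollars on ebay.'
--             elif gift[0][0] == 'clothing':
--                 if curr_spot != 0:
--                     final_message += ' '
--                 final_message += 'It might be time for {0} to refresh his wardrobe. I found some apparel from ' + gift[0][1] + ' for ' + gift[1] + ' dollars on ebay.'
--             elif gift[0] == 'college':
--                 if curr_spot != 0: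
--                     final_message += ' You could also get {0} some swag from their alma matter, ' + gift[1] + '.'
--                 else:
--                     final_message += 'You might want to get {0} some swag from their alma matter, ' + gift[1] + '.'
--             curr_spot += 1
--         return final_message
-- ===== SOURCE B (Python) =====
-- MAX_GIFTS = 3
--
-- not_enough_info_string = "I don't have enough info to suggest anything for {0}. Perhaps you should ask {0} yourself."
--
-- # Two template tables — one for the very first gift, one for every later gift
-- # (leading space and 'also' wording baked into the LATER templates) — so no
-- # position counter is needed at all.  The original's 'college' branch compares
-- # the (category, detail) pair against the string 'college', which is never true
-- # for tuple-shaped gifts, so neither table needs an entry for it.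
-- FIRST = {
--     'sports team': lambda d, p: '{0} might like an item from the ' + d + '. I found one for ' + p + ' dollars on ebay.',
--     'book': lambda d, p: '{0} might like the book ' + d + '. I found a copy for ' + p + ' dollars on ebay.',
--     'musician': lambda d, p: '{0} might like something by ' + d + '. I found some merchandise for ' + p + ' dollars on ebay.',
--     'computers': lambda d, p: 'It might be time for {0} to get some new tech. I found a ' + d + ' for ' + p + ' dollars on ebay.',
--     'clothing': lambda d, p: 'It might be time for {0} to refresh his wardrobe. I found some apparel from ' + d + ' for ' + p + ' dollars on ebay.',
-- }
--
-- LATER = {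
--     'sports team': lambda d, p: ' {0} might also like an item from the ' + d + '. I found one for ' + p + ' dollars on ebay.',
--     'book': lambda d, p: ' {0} might also like the book ' + d + '. I found a copy for ' + p + ' dollars on ebay.',
--     'musician': lambda d, p: ' {0} might also like something by ' + d + '. I found some merchandise for ' + p + ' dollars on ebay.',
--     'computers': lambda d, p: ' It might be time for {0} to get some new tech. I found a ' + d + ' for ' + p + ' dollars on ebay.',
--     'clothing': lambda d, p: ' It might be time for {0} to refresh his wardrobe. I found some apparel from ' + d + ' for ' + p + ' dollars on ebay.',
-- }
--
-- def _frag(table, gift):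
--     make = table.get(gift[0][0])
--     return make(gift[0][1], gift[1]) if make is not None else ''
--
-- def _later_msgs(gifts):
--     if not gifts:
--         return ''
--     return _frag(LATER, gifts[0]) + _later_msgs(gifts[1:])
--
-- def get_nice_message(gifts_list):
--     if not gifts_list:
--         return not_enough_info_string
--     return _frag(FIRST, gifts_list[0]) + _later_msgs(gifts_list[1:MAX_GIFTS])
-- ===== Notes on version B (the rewrite author's own statement) =====
-- stated objective: alternative
-- what changed: Replaces the counter-carrying loop over an if/elif chain by a head/tail decomposition: two template tables (first-gift wording vs later-gift wording, leading space baked in) and a recursive helper over gifts_list[1:3], so no position state or branch-per-category code exists; the original's dead 'college' branch (a tuple is never equal to the string 'college') has no table entry.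
import Mathlib
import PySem

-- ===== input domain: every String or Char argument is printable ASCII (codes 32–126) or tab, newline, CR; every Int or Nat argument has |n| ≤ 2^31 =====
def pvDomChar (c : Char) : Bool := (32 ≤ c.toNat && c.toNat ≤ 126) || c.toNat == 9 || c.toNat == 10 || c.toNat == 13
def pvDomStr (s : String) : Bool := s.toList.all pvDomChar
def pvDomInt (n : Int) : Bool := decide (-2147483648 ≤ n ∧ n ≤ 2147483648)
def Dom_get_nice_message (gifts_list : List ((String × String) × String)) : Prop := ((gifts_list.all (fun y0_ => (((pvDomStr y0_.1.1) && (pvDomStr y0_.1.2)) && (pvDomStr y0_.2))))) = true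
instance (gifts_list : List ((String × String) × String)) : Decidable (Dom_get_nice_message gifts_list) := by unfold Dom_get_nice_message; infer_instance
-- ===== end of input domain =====

-- B replaces A's counter-carrying if/elif loop by two template tables (first vs later
-- wording) and a head/tail recursion over gifts_list[1:3]; return value only, no mutation.

def pvNotEnoughInfo : String := "I don't have enough info to suggest anything for {0}. Perhaps you should ask {0} yourself."

-- ===== PORT A =====
-- loop body of A's for-loop: state = (final_message, curr_spot)
def pvStepA (st : String × Int) (gift : (String × String) × String) : String × Int :=
  let fm := st.1
  let cs := st.2
  let fm :=
    if gift.1.1 == "sports team" then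
      if cs == 0 then
        fm ++ ("{0} might like an item from the " ++ gift.1.2 ++ ". I found one for " ++ gift.2 ++ " dollars on ebay.")
      else
        fm ++ (" {0} might also like an item from the " ++ gift.1.2 ++ ". I found one for " ++ gift.2 ++ " dollars on ebay.")
    else if gift.1.1 == "book" then
      if cs == 0 then
        fm ++ ("{0} might like the book " ++ gift.1.2 ++ ". I found a copy for " ++ gift.2 ++ " dollars on ebay.")
      else
        fm ++ (" {0} might also like the book " ++ gift.1.2 ++ ". I found a copy for " ++ gift.2 ++ " dollars on ebay.")
    else if gift.1.1 == "musician" then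
      if cs == 0 then
        fm ++ ("{0} might like something by " ++ gift.1.2 ++ ". I found some merchandise for " ++ gift.2 ++ " dollars on ebay.")
      else
        fm ++ (" {0} might also like something by " ++ gift.1.2 ++ ". I found some merchandise for " ++ gift.2 ++ " dollars on ebay.")
    else if gift.1.1 == "computers" then
      (if cs != 0 then fm ++ " " else fm) ++
        ("It might be time for {0} to get some new tech. I found a " ++ gift.1.2 ++ " for " ++ gift.2 ++ " dollars on ebay.")
    else if gift.1.1 == "clothing" then
      (if cs != 0 then fm ++ " " else fm) ++
        ("It might be time for {0} to refresh his wardrobe. I found some apparel from " ++ gift.1.2 ++ " for " ++ gift.2 ++ " dollars on ebay.")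
    else
      -- Python's `elif gift[0] == 'college'`: gift[0] is the (category, detail) PAIR, and
      -- a tuple never equals a string in Python, so this branch never fires; exact as `fm`.
      fm
  (fm, cs + 1)

def get_nice_message (gifts_list : List ((String × String) × String)) : String :=
  if gifts_list = [] then
    pvNotEnoughInfo
  else
    ((PySem.List.slice gifts_list (some 0) (some 3)).foldl pvStepA ("", 0)).1

-- ===== PORT B =====
def pvFirst : PySem.Dict String (String → String → String) :=
  PySem.Dict.ofList [
    ("sports team", fun d p => "{0} might like an item from the " ++ d ++ ". I found one for " ++ p ++ " dollars on ebay."),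
    ("book", fun d p => "{0} might like the book " ++ d ++ ". I found a copy for " ++ p ++ " dollars on ebay."),
    ("musician", fun d p => "{0} might like something by " ++ d ++ ". I found some merchandise for " ++ p ++ " dollars on ebay."),
    ("computers", fun d p => "It might be time for {0} to get some new tech. I found a " ++ d ++ " for " ++ p ++ " dollars on ebay."),
    ("clothing", fun d p => "It might be time for {0} to refresh his wardrobe. I found some apparel from " ++ d ++ " for " ++ p ++ " dollars on ebay.")]

def pvLater : PySem.Dict String (String → String → String) :=
  PySem.Dict.ofList [
    ("sports team", fun d p => " {0} might also like an item from the " ++ d ++ ". I found one for " ++ p ++ " dollars on ebay."),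
    ("book", fun d p => " {0} might also like the book " ++ d ++ ". I found a copy for " ++ p ++ " dollars on ebay."),
    ("musician", fun d p => " {0} might also like something by " ++ d ++ ". I found some merchandise for " ++ p ++ " dollars on ebay."),
    ("computers", fun d p => " It might be time for {0} to get some new tech. I found a " ++ d ++ " for " ++ p ++ " dollars on ebay."),
    ("clothing", fun d p => " It might be time for {0} to refresh his wardrobe. I found some apparel from " ++ d ++ " for " ++ p ++ " dollars on ebay.")]

def pvFragB (table : PySem.Dict String (String → String → String)) (gift : (String × String) × String) : String :=
  match table.get? gift.1.1 with
  | some make => make gift.1.2 gift.2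
  | none => ""

def pvLaterMsgs : List ((String × String) × String) → String
  | [] => ""
  | g :: t => pvFragB pvLater g ++ pvLaterMsgs t

def get_nice_message_alt (gifts_list : List ((String × String) × String)) : String :=
  match gifts_list with
  | [] => pvNotEnoughInfo
  | g :: rest => pvFragB pvFirst g ++ pvLaterMsgs (PySem.List.slice (g :: rest) (some 1) (some 3))

-- ===== PRECONDITION & SPEC =====
def Spec_get_nice_message (gifts_list : List ((String × String) × String)) (out : String) : Prop := out = get_nice_message_alt gifts_list
instance (gifts_list : List ((String × String) × String)) (out : String) : Decidable (Spec_get_nice_message gifts_list out) := by unfold Spec_get_nice_message; infer_instance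

-- ===== CLAIM (what is proved, stated in full; the proofs are below) =====
def Claim_equal_get_nice_message : Prop := ∀ (gifts_list : List ((String × String) × String)), Dom_get_nice_message gifts_list → Spec_get_nice_message gifts_list (get_nice_message gifts_list)

-- ===== LEMMAS AND PROOFS =====

-- the piece A appends for one gift at position cs
def pvFragA (g : (String × String) × String) (cs : Int) : String :=
  if g.1.1 == "sports team" then
    if cs == 0 then "{0} might like an item from the " ++ g.1.2 ++ ". I found one for " ++ g.2 ++ " dollars on ebay."
    else " {0} might also like an item from the " ++ g.1.2 ++ ". I found one for " ++ g.2 ++ " dollars on ebay."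
  else if g.1.1 == "book" then
    if cs == 0 then "{0} might like the book " ++ g.1.2 ++ ". I found a copy for " ++ g.2 ++ " dollars on ebay."
    else " {0} might also like the book " ++ g.1.2 ++ ". I found a copy for " ++ g.2 ++ " dollars on ebay."
  else if g.1.1 == "musician" then
    if cs == 0 then "{0} might like something by " ++ g.1.2 ++ ". I found some merchandise for " ++ g.2 ++ " dollars on ebay."
    else " {0} might also like something by " ++ g.1.2 ++ ". I found some merchandise for " ++ g.2 ++ " dollars on ebay."
  else if g.1.1 == "computers" then
    (if cs != 0 then " " else "") ++ ("It might be time for {0} to get some new tech. I found a " ++ g.1.2 ++ " for " ++ g.2 ++ " dollars on ebay.")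
  else if g.1.1 == "clothing" then
    (if cs != 0 then " " else "") ++ ("It might be time for {0} to refresh his wardrobe. I found some apparel from " ++ g.1.2 ++ " for " ++ g.2 ++ " dollars on ebay.")
  else ""

lemma pvStepA_frag (st : String × Int) (g : (String × String) × String) :
    pvStepA st g = (st.1 ++ pvFragA g st.2, st.2 + 1) := by
  simp only [pvStepA, pvFragA]
  split_ifs <;> simp [String.append_assoc, String.append_empty]

lemma pvFrag_first (g : (String × String) × String) :
    pvFragB pvFirst g = pvFragA g 0 := by
  by_cases h1 : g.1.1 = "sports team" <;>
  by_cases h2 : g.1.1 = "book" <;>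
  by_cases h3 : g.1.1 = "musician" <;>
  by_cases h4 : g.1.1 = "computers" <;>
  by_cases h5 : g.1.1 = "clothing" <;>
    (apply String.toList_inj.mp
     simp_all [pvFragB, pvFragA, pvFirst, PySem.Dict.ofList, PySem.Dict.update, PySem.Dict.get?_insert,
       String.toList_append])

lemma pvFrag_rest (g : (String × String) × String) (cs : Int) (h : (cs == 0) = false) :
    pvFragB pvLater g = pvFragA g cs := by
  by_cases h1 : g.1.1 = "sports team" <;>
  by_cases h2 : g.1.1 = "book" <;>
  by_cases h3 : g.1.1 = "musician" <;>
  by_cases h4 : g.1.1 = "computers" <;>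
  by_cases h5 : g.1.1 = "clothing" <;>
    (apply String.toList_inj.mp
     simp_all [pvFragB, pvFragA, pvLater, PySem.Dict.ofList, PySem.Dict.update, PySem.Dict.get?_insert,
       String.toList_append])

-- ===== VERDICT (by name: the statement is the Claim_ definition above) =====
theorem get_nice_message_spec : Claim_equal_get_nice_message := by
  intro gifts_list _
  unfold Spec_get_nice_message
  match gifts_list with
  | [] => rfl
  | [a] =>
      simp [get_nice_message, get_nice_message_alt, PySem.List.slice, PySem.List.clampIdx,
        List.foldl, pvStepA_frag, pvLaterMsgs, pvFrag_first, String.empty_append, String.append_empty]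
  | [a, b] =>
      simp [get_nice_message, get_nice_message_alt, PySem.List.slice, PySem.List.clampIdx,
        List.foldl, pvStepA_frag, pvLaterMsgs, pvFrag_first, String.empty_append, String.append_empty]
      rw [pvFrag_rest b 1 (by decide)]
  | a :: b :: c :: rest =>
      simp [get_nice_message, get_nice_message_alt, PySem.List.slice, PySem.List.clampIdx,
        List.foldl, pvStepA_frag, pvLaterMsgs, pvFrag_first, String.empty_append, String.append_empty]
      rw [pvFrag_rest b 1 (by decide), pvFrag_rest c 2 (by decide), String.append_assoc]
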